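-- pv_equiv track=rewrite | github.com/Neha-Pal/Coding_problems | sumOfAlldivisor.py | sumOfAllDivisor
-- ===== SOURCE A (Python) =====
-- def sumOfAllDivisor(n: int) -> int:
--     total_sum = 0
--     for i in range(1, n+1):
--         divisor_sum = 0
--         for j in range(1, i+1):
--             if i % j == 0:
--                 divisor_sum += j
--         total_sum += divisor_sum
--     return total_sum
-- ===== SOURCE B (Python) =====
-- def sumOfAllDivisor(n: int) -> int:
--     # One pass: each divisor j divides floor(n/j) integers in 1..n,
--     # contributing j * (n // j) to the grand total.
--     total = 0
--     for j in range(1, n + 1):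
--         total += j * (n // j)
--     return total
-- ===== Notes on version B (the rewrite author's own statement) =====
-- stated objective: faster
-- what changed: Replaces the quadratic double loop (summing the divisor-sum of each i in 1..n) by a single pass summing j * (n // j) over j in 1..n, counting each divisor's total contribution at once.
import Mathlib
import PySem

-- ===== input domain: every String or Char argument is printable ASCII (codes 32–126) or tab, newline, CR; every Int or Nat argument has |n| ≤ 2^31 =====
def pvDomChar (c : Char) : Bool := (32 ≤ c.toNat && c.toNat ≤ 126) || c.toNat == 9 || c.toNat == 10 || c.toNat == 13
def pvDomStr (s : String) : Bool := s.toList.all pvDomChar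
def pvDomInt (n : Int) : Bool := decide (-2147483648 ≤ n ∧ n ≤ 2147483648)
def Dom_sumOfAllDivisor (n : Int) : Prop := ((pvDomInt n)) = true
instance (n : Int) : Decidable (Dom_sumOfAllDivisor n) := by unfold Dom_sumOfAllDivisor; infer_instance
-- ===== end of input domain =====

-- B replaces A's quadratic double loop by a single pass summing j * (n // j), counting each
-- divisor's total contribution to all of 1..n at once (objective: faster, O(n^2) → O(n)).

-- ===== PORT A =====
def sumOfAllDivisor (n : Int) : Int :=
  (PySem.List.pyRange 1 (n+1) 1).foldl (fun total_sum i =>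
    total_sum + (PySem.List.pyRange 1 (i+1) 1).foldl
      (fun divisor_sum j => if PySem.Int.mod i j = 0 then divisor_sum + j else divisor_sum) 0) 0

-- ===== PORT B =====
def sumOfAllDivisor_alt (n : Int) : Int :=
  (PySem.List.pyRange 1 (n+1) 1).foldl (fun total j => total + j * PySem.Int.floordiv n j) 0

-- ===== PRECONDITION & SPEC =====
def Spec_sumOfAllDivisor (n : Int) (out : Int) : Prop := out = sumOfAllDivisor_alt n
instance (n : Int) (out : Int) : Decidable (Spec_sumOfAllDivisor n out) := by unfold Spec_sumOfAllDivisor; infer_instance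

-- ===== CLAIM (what is proved, stated in full; the proofs are below) =====
def Claim_equal_sumOfAllDivisor : Prop := ∀ (n : Int), Dom_sumOfAllDivisor n → Spec_sumOfAllDivisor n (sumOfAllDivisor n)

-- ===== LEMMAS AND PROOFS =====

-- sum of divisors of i, as the Nat-side value of A's inner loop (divisor candidate j = t+1, t < i)
def pvSig (i : ℕ) : ℕ := ∑ t ∈ Finset.range i, (if (t+1) ∣ i then t+1 else 0)

-- the double-counting identity behind B: ∑_{i≤N} σ(i) = ∑_{j≤N} j·⌊N/j⌋
theorem pvKey (N : ℕ) :
    ∑ i ∈ Finset.range N, pvSig (i+1) = ∑ j ∈ Finset.range N, (j+1) * (N / (j+1)) := by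
  induction N with
  | zero => simp
  | succ N ih =>
    rw [Finset.sum_range_succ, ih, Finset.sum_range_succ (f := fun j => (j+1) * ((N+1) / (j+1)))]
    have h1 : ∀ j, (j+1) * ((N+1) / (j+1)) = (j+1) * (N / (j+1)) + (if (j+1) ∣ (N+1) then j+1 else 0) := by
      intro j
      rw [Nat.succ_div, Nat.mul_add]
      split <;> simp
    calc ∑ j ∈ Finset.range N, (j+1) * (N / (j+1)) + pvSig (N+1)
        = ∑ j ∈ Finset.range N, ((j+1) * (N / (j+1)) + (if (j+1) ∣ (N+1) then j+1 else 0)) + (N+1) := by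
          rw [Finset.sum_add_distrib, pvSig, Finset.sum_range_succ]
          have : (if (N+1) ∣ (N+1) then N+1 else 0) = N+1 := by simp
          omega
      _ = ∑ j ∈ Finset.range N, (j+1) * ((N+1) / (j+1)) + (N+1) * ((N+1) / (N+1)) := by
          simp [← h1, Nat.div_self]

theorem pvSumMapRange (N : ℕ) (f : ℕ → ℤ) :
    ((List.range N).map f).sum = ∑ i ∈ Finset.range N, f i := by
  induction N with
  | zero => simp
  | succ N ih => rw [List.range_succ, Finset.sum_range_succ]; simp [ih]

-- A's inner loop at i = ↑m computes σ(m)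
theorem pvInnerEq (i : ℤ) (m : ℕ) (him : i = (m:ℤ)) :
    (PySem.List.pyRange 1 (i+1) 1).foldl
      (fun divisor_sum j => if PySem.Int.mod i j = 0 then divisor_sum + j else divisor_sum) 0
    = (pvSig m : ℤ) := by
  subst him
  have hcg : (fun (ds j : ℤ) => if PySem.Int.mod (m:ℤ) j = 0 then ds + j else ds)
      = fun ds j => ds + (if PySem.Int.mod (m:ℤ) j = 0 then j else 0) := by
    funext ds j; split <;> simp
  rw [hcg]
  rw [PySem.List.foldl_add]
  rw [PySem.List.pyRange_one]
  have hN : ((m:ℤ)+1-1).toNat = m := by omega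
  rw [hN, List.map_map, pvSumMapRange, zero_add]
  simp only [pvSig, Nat.cast_sum]
  apply Finset.sum_congr rfl
  intro t ht
  simp only [Function.comp]
  have hj : (1:ℤ) + (t:ℤ) = ((t+1 : ℕ) : ℤ) := by push_cast; ring
  rw [hj]
  simp only [PySem.Int.mod_eq_zero_iff_dvd, Int.natCast_dvd_natCast,
    apply_ite (Nat.cast : ℕ → ℤ), Nat.cast_zero]

theorem pvAEq (n : ℤ) (hn : 0 ≤ n) :
    sumOfAllDivisor n = ∑ k ∈ Finset.range n.toNat, (pvSig (k+1) : ℤ) := by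
  unfold sumOfAllDivisor
  rw [PySem.List.foldl_add, PySem.List.pyRange_one]
  have hN : (n+1-1).toNat = n.toNat := by omega
  rw [hN, List.map_map, pvSumMapRange]
  simp only [zero_add]
  apply Finset.sum_congr rfl
  intro k hk
  simp only [Function.comp]
  rw [pvInnerEq (1 + (k:ℤ)) (k+1) (by push_cast; ring)]

theorem pvBEq (n : ℤ) (hn : 0 ≤ n) :
    sumOfAllDivisor_alt n = ∑ k ∈ Finset.range n.toNat, ((k+1) * (n.toNat / (k+1)) : ℕ) := by
  unfold sumOfAllDivisor_alt
  rw [PySem.List.foldl_add, PySem.List.pyRange_one]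
  have hN : (n+1-1).toNat = n.toNat := by omega
  rw [hN, List.map_map, pvSumMapRange, Nat.cast_sum]
  simp only [zero_add]
  apply Finset.sum_congr rfl
  intro k hk
  simp only [Function.comp]
  have hfd : PySem.Int.floordiv n (1 + (k:ℤ)) = ((n.toNat/(k+1) : ℕ) : ℤ) := by
    have hj : (1:ℤ) + (k:ℤ) = ((k+1 : ℕ) : ℤ) := by push_cast; ring
    rw [hj]
    conv_lhs => rw [show n = ((n.toNat : ℕ) : ℤ) by omega]
    exact PySem.Int.floordiv_natCast _ _
  rw [hfd]
  push_cast [Nat.cast_div_le]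
  ring_nf

theorem pvAB (n : ℤ) : sumOfAllDivisor n = sumOfAllDivisor_alt n := by
  by_cases hn : 0 ≤ n
  · rw [pvAEq n hn, pvBEq n hn, ← Nat.cast_sum, pvKey]
  · unfold sumOfAllDivisor sumOfAllDivisor_alt
    rw [PySem.List.pyRange_one_eq_nil (by omega)]
    rfl

-- ===== VERDICT (by name: the statement is the Claim_ definition above) =====
theorem sumOfAllDivisor_spec : Claim_equal_sumOfAllDivisor := by
  intro n _
  unfold Spec_sumOfAllDivisor
  exact pvAB n
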